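-- pv_equiv track=rewrite | github.com/Ward-Ceyssens/Jacdac-cpp | convert.py | isNotInBrackets
-- ===== SOURCE A (Python) =====
-- def isNotInBrackets(fullstr: str, end: int):
--     count = 0
--
--     for char in fullstr[:end]:
--         if char == '{':
--             count += 1
--         elif char == '}':
--             count -= 1
--
--     return count == 0
-- ===== SOURCE B (Python) =====
-- def isNotInBrackets(fullstr: str, end: int):
--     s = fullstr[:end]
--     return s.count('{') == s.count('}')
-- ===== Notes on version B (the rewrite author's own statement) =====
-- stated objective: idiomatic
-- what changed: Replaces the explicit branching accumulator loop with slicing the prefix once and comparing the results of two independent str.count passes (balanced iff the counts are equal).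
import Mathlib
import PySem

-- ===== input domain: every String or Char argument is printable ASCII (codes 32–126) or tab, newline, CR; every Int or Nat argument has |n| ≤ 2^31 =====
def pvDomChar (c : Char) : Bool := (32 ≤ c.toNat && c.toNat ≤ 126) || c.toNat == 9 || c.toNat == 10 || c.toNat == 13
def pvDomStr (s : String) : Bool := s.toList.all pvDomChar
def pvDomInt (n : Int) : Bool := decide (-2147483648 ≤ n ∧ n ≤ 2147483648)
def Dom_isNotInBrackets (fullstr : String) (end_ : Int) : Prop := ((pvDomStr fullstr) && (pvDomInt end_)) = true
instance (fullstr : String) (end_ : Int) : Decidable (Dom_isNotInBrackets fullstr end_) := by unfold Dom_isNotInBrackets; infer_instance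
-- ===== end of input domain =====

-- B replaces A's branching accumulator loop by slicing the prefix once and comparing two
-- independent '{'/'}' counts; same O(n) cost, more idiomatic.

-- ===== PORT A =====
-- count = 0; for char in fullstr[:end]: …; return count == 0
def isNotInBrackets (fullstr : String) (end_ : Int) : Bool :=
  let count : Int :=
    (PySem.Str.slice fullstr none (some end_)).toList.foldl
      (fun count char =>
        if char == '{' then count + 1
        else if char == '}' then count - 1
        else count) 0
  count == 0

-- ===== PORT B =====
-- s = fullstr[:end]; return s.count('{') == s.count('}')
def isNotInBrackets_alt (fullstr : String) (end_ : Int) : Bool :=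
  let s := PySem.Str.slice fullstr none (some end_)
  PySem.Str.count s "{" == PySem.Str.count s "}"

-- ===== PRECONDITION & SPEC =====
def Spec_isNotInBrackets (fullstr : String) (end_ : Int) (out : Bool) : Prop := out = isNotInBrackets_alt fullstr end_
instance (fullstr : String) (end_ : Int) (out : Bool) : Decidable (Spec_isNotInBrackets fullstr end_ out) := by unfold Spec_isNotInBrackets; infer_instance

-- ===== CLAIM (what is proved, stated in full; the proofs are below) =====
def Claim_equal_isNotInBrackets : Prop := ∀ (fullstr : String) (end_ : Int), Dom_isNotInBrackets fullstr end_ → Spec_isNotInBrackets fullstr end_ (isNotInBrackets fullstr end_)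

-- ===== LEMMAS AND PROOFS =====

-- A's loop computes (#'{' − #'}') over the prefix.
theorem pv_foldA (l : List Char) (a : Int) :
    l.foldl (fun count char =>
        if char == '{' then count + 1
        else if char == '}' then count - 1
        else count) a
      = a + (l.count '{' : Int) - (l.count '}' : Int) := by
  induction l generalizing a with
  | nil => simp
  | cons h t ih =>
    simp only [List.foldl_cons, ih, List.count_cons]
    by_cases h1 : h = '{'
    · simp [h1]; omega
    · by_cases h2 : h = '}'
      · simp [h2]; omega
      · simp [h1, h2]

-- Python str.count with a single-character needle is the character count.
theorem pv_count_go_single (c : Char) (l : List Char) (fuel acc : Nat)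
    (hf : l.length ≤ fuel) :
    PySem.Chars.count.go [c] fuel l acc = acc + l.count c := by
  induction l generalizing fuel acc with
  | nil => cases fuel <;> simp [PySem.Chars.count.go]
  | cons h t ih =>
    cases fuel with
    | zero => simp at hf
    | succ f =>
      have hf' : t.length ≤ f := by simpa using hf
      by_cases hc : h = c
      · simp [PySem.Chars.count.go, List.isPrefixOf, hc, ih f (acc + 1) hf']
        omega
      · simp [PySem.Chars.count.go, List.isPrefixOf, hc, Ne.symm hc,
          ih f acc hf']

theorem pv_count_single (c : Char) (l : List Char) :
    PySem.Chars.count l [c] = l.count c := by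
  simp [PySem.Chars.count, List.isEmpty, pv_count_go_single c l l.length 0 le_rfl]

-- ===== VERDICT (by name: the statement is the Claim_ definition above) =====
theorem isNotInBrackets_spec : Claim_equal_isNotInBrackets := by
  intro fullstr end_ _
  unfold Spec_isNotInBrackets isNotInBrackets isNotInBrackets_alt
  simp only [PySem.Str.count_eq, pv_foldA]
  have h1 : ("{" : String).toList = ['{'] := rfl
  have h2 : ("}" : String).toList = ['}'] := rfl
  rw [h1, h2, pv_count_single, pv_count_single]
  set l := (PySem.Str.slice fullstr none (some end_)).toList
  rcases eq_or_ne (l.count '{') (l.count '}') with h | h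
  · simp [h]
  · have ha : ((0 : Int) + (l.count '{' : Int) - (l.count '}' : Int) == 0) = false := by
      simp only [beq_eq_false_iff_ne, ne_eq]; omega
    have hb : ((l.count '{' : Nat) == l.count '}') = false := by
      simp only [beq_eq_false_iff_ne, ne_eq]; exact h
    rw [ha, hb]
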